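-- pv_equiv track=rewrite | github.com/AlmightyFuzz/AdventOfCode | AOC17/day04.py | passphrase_check
-- ===== SOURCE A (Python) =====
-- def passphrase_check(phrase):
--     words = phrase.strip('\n')
--     words = words.split(' ')
--
--     # Sort letters in a word into order in order to find anagrams
--     words = list(map(sort_word, words))
--
--     words = sorted(words)
--
--     for i, word in enumerate(words):
--         if i + 1 < len(words):
--             if word == words[i + 1]:
--                 return False
--
--     return True
--
-- def sort_word(word):
--     letters = list(word)
--     letters = sorted(letters)
--     sorted_word = ''.join(letters)
--
--     return sorted_word
-- ===== SOURCE B (Python) =====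
-- def passphrase_check(phrase):
--     words = phrase.strip('\n').split(' ')
--     canon = [''.join(sorted(w)) for w in words]
--     for i in range(len(canon)):
--         for j in range(i + 1, len(canon)):
--             if canon[i] == canon[j]:
--                 return False
--     return True
-- ===== Notes on version B (the rewrite author's own statement) =====
-- stated objective: alternative
-- what changed: B replaces A's sort-the-word-list-then-scan-adjacent-pairs check with a direct all-pairs nested comparison of the canonical (letter-sorted) forms, with no sort of the word list.
import Mathlib
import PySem

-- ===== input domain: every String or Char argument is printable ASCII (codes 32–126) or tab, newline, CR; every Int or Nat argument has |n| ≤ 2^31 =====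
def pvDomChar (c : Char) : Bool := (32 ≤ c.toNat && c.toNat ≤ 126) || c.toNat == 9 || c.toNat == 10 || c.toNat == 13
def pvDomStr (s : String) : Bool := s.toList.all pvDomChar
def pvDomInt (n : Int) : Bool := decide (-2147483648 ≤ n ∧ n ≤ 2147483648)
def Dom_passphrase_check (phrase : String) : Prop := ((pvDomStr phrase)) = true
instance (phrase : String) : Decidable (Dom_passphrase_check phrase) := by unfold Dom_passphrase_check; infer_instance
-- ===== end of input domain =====

-- B replaces A's sort-then-adjacent-scan duplicate check with an all-pairs nested comparison
-- of the letter-sorted word forms (no sort of the word list); an alternative of similar cost.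

-- ===== PORT A =====
-- sort_word: ''.join(sorted(list(word))) — sorting the characters by codepoint and
-- concatenating them back; exact for Python's 1-char-string comparison.
def sort_word (word : String) : String :=
  String.ofList (PySem.List.sorted word.toList (fun c => c) false)

-- the for-loop over enumerate(words): compares each word to its successor, False on match
def pvScanAdj (ws : List String) : Bool :=
  match ws with
  | a :: b :: t => if a = b then false else pvScanAdj (b :: t)
  | _ => true

def passphrase_check (phrase : String) : Bool :=
  let words := PySem.Str.stripChars phrase "\n"
  let words := (PySem.Str.split? words " ").getD []
  let words := words.map sort_word
  let words := PySem.List.sorted words (fun x => x) false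
  pvScanAdj words

-- ===== PORT B =====
-- the nested i<j loops: compare the head canonical form against every later one, recurse
def pvAnyLaterEq (cs : List String) : Bool :=
  match cs with
  | [] => false
  | h :: t => t.contains h || pvAnyLaterEq t

def passphrase_check_alt (phrase : String) : Bool :=
  !(pvAnyLaterEq (((PySem.Str.split? (PySem.Str.stripChars phrase "\n") " ").getD []).map
    (fun w => String.ofList (PySem.List.sorted w.toList (fun c => c) false))))

-- ===== PRECONDITION & SPEC =====
def Spec_passphrase_check (phrase : String) (out : Bool) : Prop := out = passphrase_check_alt phrase
instance (phrase : String) (out : Bool) : Decidable (Spec_passphrase_check phrase out) := by unfold Spec_passphrase_check; infer_instance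

-- ===== CLAIM (what is proved, stated in full; the proofs are below) =====
def Claim_equal_passphrase_check : Prop := ∀ (phrase : String), Dom_passphrase_check phrase → Spec_passphrase_check phrase (passphrase_check phrase)

-- ===== LEMMAS AND PROOFS =====

-- B's pairwise scan finds a duplicate iff the list is not Nodup
theorem pvAnyLaterEq_eq (l : List String) : pvAnyLaterEq l = !decide l.Nodup := by
  induction l with
  | nil => simp [pvAnyLaterEq]
  | cons h t ih =>
    by_cases hm : h ∈ t <;> simp [pvAnyLaterEq, ih, List.nodup_cons, hm]

-- A's adjacent scan on a (≤)-pairwise list returns true iff the list is Nodup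
theorem pvScanAdj_eq (l : List String) (hs : l.Pairwise (· ≤ ·)) :
    pvScanAdj l = decide l.Nodup := by
  induction l with
  | nil => simp [pvScanAdj]
  | cons a t ih =>
    match t, hs with
    | [], _ => simp [pvScanAdj]
    | b :: t', hs =>
      rcases List.pairwise_cons.mp hs with ⟨ha, hs'⟩
      by_cases hab : a = b
      · subst hab
        simp [pvScanAdj, List.nodup_cons]
      · have hnotmem : a ∉ b :: t' := by
          intro hmem
          rcases List.mem_cons.mp hmem with heq | hmem
          · exact hab heq
          · have h1 : a ≤ b := ha b (List.mem_cons_self ..)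
            have h2 : b ≤ a := (List.pairwise_cons.mp hs').1 a hmem
            exact hab (le_antisymm h1 h2)
        simp only [pvScanAdj, if_neg hab]
        rw [ih hs']
        simp [List.nodup_cons, hnotmem]

-- ===== VERDICT (by name: the statement is the Claim_ definition above) =====
theorem passphrase_check_spec : Claim_equal_passphrase_check := by
  intro phrase _
  unfold Spec_passphrase_check passphrase_check passphrase_check_alt
  rw [pvScanAdj_eq _ (PySem.List.sorted_pairwise _ _), pvAnyLaterEq_eq]
  simp only [Bool.not_not, decide_eq_decide]
  exact (PySem.List.sorted_perm _ _ false).nodup_iff
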